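-- pv_equiv track=rewrite | github.com/bat9r/DBEdit | DBEdit_alpha/ver01/DBMan.py | findOutRelationshipBetweenColumns
-- ===== SOURCE A (Python) =====
-- def findOutRelationshipBetweenColumns (column1, column2):
--     '''
--     Function check relationships between two input columns and return list
--     with type of relationship.
--     '''
--     def manyOrOne(checkList):
--         for i in checkList:
--             if i > 1:
--                 return (u"\u221E")
--         else:
--             return ('1')
--
--     checkListForColumn1 = [0 for i in column1]
--     checkListForColumn2 = [0 for i in column2]
--     for i in range(len(column1)):
--         for j in range(len(column2)):
--             if column1[i] == column2[j]:
--                 checkListForColumn1[i]+=1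
--     for i in range(len(column2)):
--         for j in range(len(column1)):
--             if column2[i] == column1[j]:
--                 checkListForColumn2[i]+=1
--     resultList = []
--     resultList.append(manyOrOne(checkListForColumn2))
--     resultList.append(manyOrOne(checkListForColumn1))
--     return resultList
-- ===== SOURCE B (Python) =====
-- def findOutRelationshipBetweenColumns (column1, column2):
--     '''
--     Function check relationships between two input columns and return list
--     with type of relationship.
--     '''
--     counts1 = {}
--     for v in column1:
--         counts1[v] = counts1.get(v, 0) + 1
--     counts2 = {}
--     for v in column2:
--         counts2[v] = counts2.get(v, 0) + 1
--     rel2 = u"\u221E" if any(counts1.get(v, 0) > 1 for v in column2) else '1'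
--     rel1 = u"\u221E" if any(counts2.get(v, 0) > 1 for v in column1) else '1'
--     return [rel2, rel1]
-- ===== Notes on version B (the rewrite author's own statement) =====
-- stated objective: faster
-- what changed: Replaces A's quadratic nested index scans that build per-element match-count lists with two hash-table frequency counters built in one pass each, then a linear any-membership test per column.
import Mathlib
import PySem

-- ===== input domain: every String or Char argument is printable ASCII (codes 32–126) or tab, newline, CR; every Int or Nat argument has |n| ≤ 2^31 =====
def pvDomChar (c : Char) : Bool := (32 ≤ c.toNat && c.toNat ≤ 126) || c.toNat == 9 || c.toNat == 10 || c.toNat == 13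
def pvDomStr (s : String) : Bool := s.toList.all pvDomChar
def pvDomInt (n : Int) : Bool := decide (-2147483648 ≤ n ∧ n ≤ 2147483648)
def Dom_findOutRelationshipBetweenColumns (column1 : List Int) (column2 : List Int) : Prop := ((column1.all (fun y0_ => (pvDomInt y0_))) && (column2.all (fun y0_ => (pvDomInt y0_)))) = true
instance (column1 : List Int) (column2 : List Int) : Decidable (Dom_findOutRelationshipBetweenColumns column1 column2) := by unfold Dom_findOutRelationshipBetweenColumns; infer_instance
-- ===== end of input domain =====

-- B replaces A's quadratic nested index scans with two one-pass frequency counters plus a linear membership test (faster, O(n+m) vs O(n*m)).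


-- ===== PORT A =====
-- helper manyOrOne: Python's for/else loop returning '∞' at the first element > 1, else '1'
def manyOrOne : List Int → String
  | [] => "1"
  | i :: rest => if i > 1 then "∞" else manyOrOne rest

-- nested index loops; indices produced by range are nonnegative, so acc.set i.toNat / acc.getD i.toNat
-- is exact for Python's checkList[i] += 1 here
def findOutRelationshipBetweenColumns (column1 : List Int) (column2 : List Int) : List String :=
  let checkListForColumn1 := column1.map (fun _ => (0 : Int))
  let checkListForColumn2 := column2.map (fun _ => (0 : Int))
  let checkListForColumn1 :=
    (PySem.List.pyRange 0 (column1.length : Int) 1).foldl (fun acc i =>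
      (PySem.List.pyRange 0 (column2.length : Int) 1).foldl (fun acc2 j =>
        if PySem.List.pyGetD column1 i 0 == PySem.List.pyGetD column2 j 0 then
          acc2.set i.toNat (acc2.getD i.toNat 0 + 1)
        else acc2) acc) checkListForColumn1
  let checkListForColumn2 :=
    (PySem.List.pyRange 0 (column2.length : Int) 1).foldl (fun acc i =>
      (PySem.List.pyRange 0 (column1.length : Int) 1).foldl (fun acc2 j =>
        if PySem.List.pyGetD column2 i 0 == PySem.List.pyGetD column1 j 0 then
          acc2.set i.toNat (acc2.getD i.toNat 0 + 1)
        else acc2) acc) checkListForColumn2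
  [manyOrOne checkListForColumn2, manyOrOne checkListForColumn1]

-- ===== PORT B =====
def findOutRelationshipBetweenColumns_alt (column1 : List Int) (column2 : List Int) : List String :=
  let counts1 := column1.foldl (fun d v => d.insert v (d.getD v 0 + 1)) (PySem.Dict.empty : PySem.Dict Int Int)
  let counts2 := column2.foldl (fun d v => d.insert v (d.getD v 0 + 1)) (PySem.Dict.empty : PySem.Dict Int Int)
  let rel2 := if column2.any (fun v => counts1.getD v 0 > 1) then "∞" else "1"
  let rel1 := if column1.any (fun v => counts2.getD v 0 > 1) then "∞" else "1"
  [rel2, rel1]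

-- ===== PRECONDITION & SPEC =====
def Spec_findOutRelationshipBetweenColumns (column1 : List Int) (column2 : List Int) (out : List String) : Prop := out = findOutRelationshipBetweenColumns_alt column1 column2
instance (column1 : List Int) (column2 : List Int) (out : List String) : Decidable (Spec_findOutRelationshipBetweenColumns column1 column2 out) := by unfold Spec_findOutRelationshipBetweenColumns; infer_instance

-- ===== CLAIM (what is proved, stated in full; the proofs are below) =====
def Claim_equal_findOutRelationshipBetweenColumns : Prop := ∀ (column1 : List Int) (column2 : List Int), Dom_findOutRelationshipBetweenColumns column1 column2 → Spec_findOutRelationshipBetweenColumns column1 column2 (findOutRelationshipBetweenColumns column1 column2)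

-- ===== LEMMAS AND PROOFS =====

-- the inner loop increments a single slot by the number of matches
lemma inc_fold (x : Int) (l : List Int) (acc : List Int) (i : Nat) (hi : i < acc.length) :
    l.foldl (fun a v => if x == v then a.set i (a.getD i 0 + 1) else a) acc
      = acc.set i (acc.getD i 0 + l.count x) := by
  induction l generalizing acc with
  | nil => simp [hi]
  | cons v t ih =>
    by_cases h : x = v
    · subst h
      simp only [List.foldl_cons, beq_self_eq_true, if_pos]
      rw [ih _ (by simpa using hi)]
      simp [List.getD_eq_getElem?_getD, hi]
      ring_nf
    · have hb : (x == v) = false := by simp [h]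
      simp only [List.foldl_cons, hb, Bool.false_eq_true, ite_false]
      rw [ih _ hi]
      simp [Ne.symm h]

-- the outer loop up to index m: first m slots hold the match counts, the rest still zero
lemma check_fold_prefix (c1 c2 : List Int) (m : Nat) (hm : m ≤ c1.length) :
    (PySem.List.pyRange 0 (m : Int) 1).foldl (fun acc i =>
      (PySem.List.pyRange 0 (c2.length : Int) 1).foldl (fun acc2 j =>
        if PySem.List.pyGetD c1 i 0 == PySem.List.pyGetD c2 j 0 then
          acc2.set i.toNat (acc2.getD i.toNat 0 + 1)
        else acc2) acc) (c1.map (fun _ => (0 : Int)))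
    = (c1.take m).map (fun x => (c2.count x : Int)) ++ List.replicate (c1.length - m) 0 := by
  induction m with
  | zero =>
    rw [Nat.cast_zero, PySem.List.pyRange_one_eq_nil (le_refl (0:Int))]
    simp [List.map_const']
  | succ m ih =>
    have hm' : m ≤ c1.length := by omega
    have hmlt : m < c1.length := by omega
    have hcast : ((m + 1 : Nat) : Int) = (m : Int) + 1 := by push_cast; ring
    rw [hcast, PySem.List.pyRange_one_succ_right (by positivity), List.foldl_append,
        ih hm']
    set L := (c1.take m).map (fun x => ((c2.count x : Nat) : Int)) ++ List.replicate (c1.length - m) 0 with hL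
    have hlenL : L.length = c1.length := by
      simp [hL, List.length_replicate, List.length_take, Nat.min_eq_left hm']; omega
    simp only [List.foldl_cons, List.foldl_nil]
    rw [PySem.List.foldl_pyRange_zero_pyGetD' c2 0
      (fun acc2 v => if PySem.List.pyGetD c1 (m : Int) 0 == v then
          acc2.set (m : Int).toNat (acc2.getD (m : Int).toNat 0 + 1) else acc2) L]
    rw [inc_fold _ _ _ _ (by rw [Int.toNat_natCast]; omega)]
    simp only [Int.toNat_natCast]
    have hget : PySem.List.pyGetD c1 (m : Int) 0 = c1[m] := by
      simp [PySem.List.pyGetD_natCast, List.getD_eq_getElem?_getD, hmlt]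
    have hLm : L.getD m 0 = 0 := by
      rw [hL]
      rw [List.getD_eq_getElem?_getD, List.getElem?_append_right (by simp [Nat.min_eq_left hm'])]
      simp [Nat.min_eq_left hm']
    rw [hget, hLm, hL, List.set_append_right _ _ (by simp [Nat.min_eq_left hm'])]
    have hrep : List.replicate (c1.length - m) (0:Int) = 0 :: List.replicate (c1.length - (m+1)) 0 := by
      rw [show c1.length - m = (c1.length - (m+1)) + 1 by omega, List.replicate_succ]
    simp only [List.length_map, List.length_take, Nat.min_eq_left hm', Nat.sub_self, hrep,
      List.set_cons_zero, zero_add, List.take_add_one, List.getElem?_eq_getElem hmlt,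
      Option.toList_some, List.map_append, List.map_cons, List.map_nil, List.append_assoc,
      List.cons_append, List.nil_append]

-- the outer loop turns the zero list into the list of match counts
lemma check_fold_eq (c1 c2 : List Int) :
    (PySem.List.pyRange 0 (c1.length : Int) 1).foldl (fun acc i =>
      (PySem.List.pyRange 0 (c2.length : Int) 1).foldl (fun acc2 j =>
        if PySem.List.pyGetD c1 i 0 == PySem.List.pyGetD c2 j 0 then
          acc2.set i.toNat (acc2.getD i.toNat 0 + 1)
        else acc2) acc) (c1.map (fun _ => (0 : Int)))
    = c1.map (fun x => (c2.count x : Int)) := by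
  rw [check_fold_prefix c1 c2 c1.length (le_refl _)]
  simp

lemma manyOrOne_map (f : Int → Int) (l : List Int) :
    manyOrOne (l.map f) = if l.any (fun v => f v > 1) then "∞" else "1" := by
  induction l with
  | nil => rfl
  | cons a t ih =>
    by_cases h : f a > 1 <;> simp [manyOrOne, h, ih]

lemma counter_getD (l : List Int) (v : Int) :
    (l.foldl (fun d v => d.insert v (d.getD v 0 + 1)) (PySem.Dict.empty : PySem.Dict Int Int)).getD v 0
      = (l.count v : Int) := by
  rw [PySem.Dict.getD_foldl_insert_add_one]
  simp

-- ===== VERDICT (by name: the statement is the Claim_ definition above) =====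
theorem findOutRelationshipBetweenColumns_spec : Claim_equal_findOutRelationshipBetweenColumns := by
  intro c1 c2 _
  unfold Spec_findOutRelationshipBetweenColumns findOutRelationshipBetweenColumns findOutRelationshipBetweenColumns_alt
  simp only [check_fold_eq, counter_getD, manyOrOne_map]
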